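-- pv_equiv track=rewrite | github.com/kecbigmt/inlinefy | main.py | merge_styles
-- ===== SOURCE A (Python) =====
-- def compare_specificity(spec1, spec2):
--     """
--     詳細度を比較する
--     spec1 > spec2 の場合は True、それ以外は False を返す
--     """
--     return spec1 > spec2
--
-- def merge_styles(current_styles, new_styles, current_specificity, new_specificity):
--     """
--     詳細度を考慮してスタイルをマージする
--     """
--     merged = current_styles.copy()
--
--     for prop, value in new_styles.items():
--         # 既存のプロパティが存在しない場合は新しい値を追加
--         if prop not in current_styles:
--             merged[prop] = value
--         # 新しいスタイルの詳細度が高い場合は上書き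
--         elif compare_specificity(new_specificity, current_specificity):
--             merged[prop] = value
--         # 詳細度が同じ場合は新しい値で上書き（CSSの通常の挙動）
--         elif new_specificity == current_specificity:
--             merged[prop] = value
--
--     return merged
-- ===== SOURCE B (Python) =====
-- def merge_styles(current_styles, new_styles, current_specificity, new_specificity):
--     # Build the result key-by-key over the merged key order (current keys first,
--     # then keys only seen in new_styles), picking each value with a pure selector
--     # instead of mutating a copy.
--     wins = new_specificity > current_specificity or new_specificity == current_specificity
--
--     def pick(prop):
--         if prop in new_styles and (prop not in current_styles or wins):
--             return new_styles[prop]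
--         return current_styles[prop]
--
--     order = list(current_styles) + [p for p in new_styles if p not in current_styles]
--     return {prop: pick(prop) for prop in order}
-- ===== Notes on version B (the rewrite author's own statement) =====
-- stated objective: alternative
-- what changed: A copies current_styles and mutates it while looping over new_styles with a three-way overwrite branch; B never mutates: it computes the merged key order (current keys, then new-only keys) and builds a fresh dict with a pure per-key value selector over that order.
import Mathlib
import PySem

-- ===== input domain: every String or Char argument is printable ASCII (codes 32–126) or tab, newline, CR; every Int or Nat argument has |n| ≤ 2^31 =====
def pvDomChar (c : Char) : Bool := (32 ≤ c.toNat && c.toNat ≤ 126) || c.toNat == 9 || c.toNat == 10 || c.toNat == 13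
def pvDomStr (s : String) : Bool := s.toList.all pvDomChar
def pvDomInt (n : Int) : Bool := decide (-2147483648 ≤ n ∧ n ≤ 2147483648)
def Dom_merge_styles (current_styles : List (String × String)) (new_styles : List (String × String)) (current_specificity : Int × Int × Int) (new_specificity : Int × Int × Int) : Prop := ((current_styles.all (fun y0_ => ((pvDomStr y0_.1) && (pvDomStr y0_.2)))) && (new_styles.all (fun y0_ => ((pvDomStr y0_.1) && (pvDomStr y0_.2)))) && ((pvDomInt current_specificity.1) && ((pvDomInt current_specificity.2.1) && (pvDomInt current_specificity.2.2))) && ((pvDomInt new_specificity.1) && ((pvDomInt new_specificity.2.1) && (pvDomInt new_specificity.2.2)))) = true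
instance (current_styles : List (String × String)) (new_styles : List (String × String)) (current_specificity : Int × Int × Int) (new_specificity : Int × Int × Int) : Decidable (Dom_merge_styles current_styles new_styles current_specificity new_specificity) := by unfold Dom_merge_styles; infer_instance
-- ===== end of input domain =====

-- B rebuilds the merged dict non-destructively: merged key order first, then a pure per-key value selector (objective: alternative).

-- ===== PORT A =====
-- Python tuple comparison spec1 > spec2 on (Int, Int, Int), lexicographic (exact).
def compare_specificity (spec1 spec2 : Int × Int × Int) : Bool :=
  spec1.1 > spec2.1 ||
    (spec1.1 == spec2.1 &&
      (spec1.2.1 > spec2.2.1 || (spec1.2.1 == spec2.2.1 && spec1.2.2 > spec2.2.2)))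

def merge_styles (current_styles : List (String × String)) (new_styles : List (String × String)) (current_specificity : Int × Int × Int) (new_specificity : Int × Int × Int) : List (String × String) :=
  (((PySem.Dict.ofList new_styles : PySem.Dict String String).items.foldl (fun merged pv =>
      if !(PySem.Dict.ofList current_styles : PySem.Dict String String).contains pv.1 then
        merged.insert pv.1 pv.2
      else if compare_specificity new_specificity current_specificity then merged.insert pv.1 pv.2
      else if new_specificity == current_specificity then merged.insert pv.1 pv.2
      else merged) (PySem.Dict.ofList current_styles))).items

-- ===== PORT B =====
def merge_styles_alt (current_styles : List (String × String)) (new_styles : List (String × String)) (current_specificity : Int × Int × Int) (new_specificity : Int × Int × Int) : List (String × String) :=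
  -- wins = new_specificity > current_specificity or new_specificity == current_specificity (tuple comparison, exact)
  let wins : Bool :=
    (new_specificity.1 > current_specificity.1 ||
      (new_specificity.1 == current_specificity.1 &&
        (new_specificity.2.1 > current_specificity.2.1 ||
          (new_specificity.2.1 == current_specificity.2.1 && new_specificity.2.2 > current_specificity.2.2)))) ||
    new_specificity == current_specificity
  let cur : PySem.Dict String String := PySem.Dict.ofList current_styles
  let nd : PySem.Dict String String := PySem.Dict.ofList new_styles
  let pick : String → String := fun prop =>
    if nd.contains prop && (!cur.contains prop || wins) then nd.getD prop "" else cur.getD prop ""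
  let order := cur.keys ++ nd.keys.filter (fun p => !cur.contains p)
  order.map (fun prop => (prop, pick prop))

-- ===== PRECONDITION & SPEC =====
def Spec_merge_styles (current_styles : List (String × String)) (new_styles : List (String × String)) (current_specificity : Int × Int × Int) (new_specificity : Int × Int × Int) (out : List (String × String)) : Prop := out = merge_styles_alt current_styles new_styles current_specificity new_specificity
instance (current_styles : List (String × String)) (new_styles : List (String × String)) (current_specificity : Int × Int × Int) (new_specificity : Int × Int × Int) (out : List (String × String)) : Decidable (Spec_merge_styles current_styles new_styles current_specificity new_specificity out) := by unfold Spec_merge_styles; infer_instance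

-- ===== CLAIM (what is proved, stated in full; the proofs are below) =====
def Claim_equal_merge_styles : Prop := ∀ (current_styles : List (String × String)) (new_styles : List (String × String)) (current_specificity : Int × Int × Int) (new_specificity : Int × Int × Int), Dom_merge_styles current_styles new_styles current_specificity new_specificity → Spec_merge_styles current_styles new_styles current_specificity new_specificity (merge_styles current_styles new_styles current_specificity new_specificity)

-- ===== LEMMAS AND PROOFS =====

-- d.update l is the left fold of insert.
theorem dict_update_eq_foldl {κ ν : Type} [BEq κ] (d : PySem.Dict κ ν) (l : List (κ × ν)) :
    PySem.Dict.update d l = l.foldl (fun d pv => d.insert pv.1 pv.2) d := by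
  induction l generalizing d with
  | nil => rfl
  | cons p t ih => simp [PySem.Dict.update, List.foldl]

-- When the new specificity wins, every branch of A's step inserts.
theorem foldl_win (cur : PySem.Dict String String) (cs ns : Int × Int × Int)
    (hwin : (compare_specificity ns cs || ns == cs) = true)
    (l : List (String × String)) (d : PySem.Dict String String) :
    l.foldl (fun merged pv =>
      if !cur.contains pv.1 then merged.insert pv.1 pv.2
      else if compare_specificity ns cs then merged.insert pv.1 pv.2
      else if ns == cs then merged.insert pv.1 pv.2
      else merged) d
    = l.foldl (fun d pv => d.insert pv.1 pv.2) d := by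
  apply List.foldl_ext
  intro d p _
  rw [Bool.or_eq_true] at hwin
  by_cases hc : cur.contains p.1 = true <;> rcases hwin with h | h <;> simp [hc, h]

-- When it loses, A's step inserts exactly the properties absent from cur.
theorem foldl_lose (cur : PySem.Dict String String) (cs ns : Int × Int × Int)
    (hgt : compare_specificity ns cs = false) (heq : (ns == cs) = false)
    (l : List (String × String)) (d : PySem.Dict String String) :
    l.foldl (fun merged pv =>
      if !cur.contains pv.1 then merged.insert pv.1 pv.2
      else if compare_specificity ns cs then merged.insert pv.1 pv.2
      else if ns == cs then merged.insert pv.1 pv.2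
      else merged) d
    = (l.filter (fun pv => !cur.contains pv.1)).foldl (fun d pv => d.insert pv.1 pv.2) d := by
  induction l generalizing d with
  | nil => rfl
  | cons p t ih =>
    by_cases hc : cur.contains p.1 = true
    · rw [List.filter_cons_of_neg (by simp [hc]), List.foldl_cons,
        if_neg (by simp [hc]), if_neg (by simp [hgt]), if_neg (by simp [heq])]
      exact ih d
    · rw [List.filter_cons_of_pos (by simp [hc]), List.foldl_cons, List.foldl_cons,
        if_pos (by simp [hc])]
      exact ih _

-- getD after an update: the last-written value of L if its key list (nodup) has k, else cur's.
theorem getD_update (cur : PySem.Dict String String) (L : List (String × String))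
    (hL : (L.map Prod.fst).Nodup) (k : String) (d : String) :
    (cur.update L).getD k d =
      match (PySem.Dict.mk L).get? k with
      | some v => v
      | none => cur.getD k d := by
  induction L generalizing cur with
  | nil => simp [PySem.Dict.update, PySem.Dict.get?]
  | cons p t ih =>
    simp only [List.map_cons, List.nodup_cons] at hL
    rw [show PySem.Dict.update cur (p :: t) = PySem.Dict.update (cur.insert p.1 p.2) t from rfl,
      ih _ hL.2, PySem.Dict.get?_mk_cons]
    by_cases hk : p.1 = k
    · subst hk
      have : (PySem.Dict.mk t).get? p.1 = none := by
        rw [PySem.Dict.get?_eq_none_iff_not_mem_keys]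
        simpa [PySem.Dict.keys] using hL.1
      simp [this, PySem.Dict.getD_insert_self]
    · simp only [beq_iff_eq, hk, if_false]
      cases h : (PySem.Dict.mk t).get? k
      · simp [PySem.Dict.getD_insert_of_ne cur p.2 d (Ne.symm hk)]
      · rfl

-- keys after an update: cur's keys, then L's new keys in order.
theorem keys_update (cur : PySem.Dict String String) (L : List (String × String))
    (hL : (L.map Prod.fst).Nodup) :
    (cur.update L).keys = cur.keys ++ (L.map Prod.fst).filter (fun k => !cur.contains k) := by
  induction L generalizing cur with
  | nil => simp [PySem.Dict.update]
  | cons p t ih =>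
    simp only [List.map_cons, List.nodup_cons] at hL
    rw [show PySem.Dict.update cur (p :: t) = PySem.Dict.update (cur.insert p.1 p.2) t from rfl,
      ih _ hL.2, List.map_cons, List.filter_cons]
    have hfilt : List.filter (fun k => !(cur.insert p.1 p.2).contains k) (List.map Prod.fst t)
        = List.filter (fun k => !cur.contains k) (List.map Prod.fst t) := by
      apply List.filter_congr
      intro k hk
      have hnp : k ≠ p.1 := fun h => hL.1 (h ▸ hk)
      simp [PySem.Dict.contains_insert, hnp]
    by_cases hc : cur.contains p.1 = true
    · rw [PySem.Dict.keys_insert_of_contains cur p.2 hc, hfilt, if_neg (by simp [hc])]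
    · rw [PySem.Dict.keys_insert_of_not_contains cur p.2 (by simpa using hc), hfilt,
        if_pos (by simp [hc]), List.append_assoc, List.singleton_append]

-- get? of a dict built from a key-filtered pair list.
theorem get?_mk_filter (l : List (String × String)) (q : String → Bool) (k : String) :
    (PySem.Dict.mk (l.filter (fun pv => q pv.1))).get? k =
      if q k then (PySem.Dict.mk l).get? k else none := by
  induction l with
  | nil => simp [PySem.Dict.get?]
  | cons p t ih =>
    obtain ⟨k1, v1⟩ := p
    rw [List.filter_cons]
    by_cases hq : q k1 = true <;> by_cases hk : k1 = k <;>
      simp_all [PySem.Dict.get?_mk_cons]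

-- ===== VERDICT (by name: the statement is the Claim_ definition above) =====
-- B's port with its lets unfolded and its inline tuple comparison re-folded into compare_specificity (definitional).
theorem alt_restate (cstyles nstyles : List (String × String)) (cspec nspec : Int × Int × Int) :
    merge_styles_alt cstyles nstyles cspec nspec =
      ((PySem.Dict.ofList cstyles : PySem.Dict String String).keys ++
        (PySem.Dict.ofList nstyles : PySem.Dict String String).keys.filter
          (fun p => !(PySem.Dict.ofList cstyles : PySem.Dict String String).contains p)).map
        (fun prop => (prop,
          if (PySem.Dict.ofList nstyles : PySem.Dict String String).contains prop &&
              (!(PySem.Dict.ofList cstyles : PySem.Dict String String).contains prop ||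
                (compare_specificity nspec cspec || nspec == cspec)) then
            (PySem.Dict.ofList nstyles : PySem.Dict String String).getD prop ""
          else (PySem.Dict.ofList cstyles : PySem.Dict String String).getD prop "")) := rfl

-- get?_mk_filter specialised to the not-in-cur predicate (definitional repackaging).
theorem get?_mk_filter_contains (c : PySem.Dict String String) (l : List (String × String))
    (k : String) :
    (PySem.Dict.mk (l.filter (fun pv => !c.contains pv.1))).get? k =
      if !c.contains k then (PySem.Dict.mk l).get? k else none :=
  get?_mk_filter l (fun x => !c.contains x) k

-- An update's items as a map over the merged key order with a per-key selector.
theorem update_items_as_map (cur : PySem.Dict String String) (L : List (String × String))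
    (hc : cur.keys.Nodup) (hL : (L.map Prod.fst).Nodup) :
    (cur.update L).items =
      (cur.keys ++ (L.map Prod.fst).filter (fun k => !cur.contains k)).map
        (fun k => (k, match (PySem.Dict.mk L).get? k with
                      | some v => v
                      | none => cur.getD k "")) := by
  rw [PySem.Dict.items_eq_map_keys _ (PySem.Dict.nodup_keys_update _ _ hc) "", keys_update _ _ hL]
  apply List.map_congr_left
  intro k _
  rw [getD_update _ _ hL]

theorem merge_styles_spec : Claim_equal_merge_styles := by
  intro cstyles nstyles cspec nspec _
  unfold Spec_merge_styles
  rw [alt_restate]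
  unfold merge_styles
  have hcurnd : (PySem.Dict.ofList cstyles : PySem.Dict String String).keys.Nodup :=
    PySem.Dict.nodup_keys_ofList cstyles
  have hndk : ((PySem.Dict.ofList nstyles : PySem.Dict String String).items.map Prod.fst).Nodup :=
    PySem.Dict.nodup_keys_ofList nstyles
  by_cases hwin : (compare_specificity nspec cspec || nspec == cspec) = true
  · rw [foldl_win _ _ _ hwin, ← dict_update_eq_foldl, update_items_as_map _ _ hcurnd hndk,
      show ((PySem.Dict.ofList nstyles : PySem.Dict String String).items.map Prod.fst)
        = (PySem.Dict.ofList nstyles : PySem.Dict String String).keys from rfl]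
    apply List.map_congr_left
    intro k _
    rw [hwin]
    cases h : (PySem.Dict.ofList nstyles : PySem.Dict String String).get? k with
    | none =>
      rw [PySem.Dict.contains_eq_isSome_get?, h]
      simp
    | some v =>
      rw [PySem.Dict.contains_eq_isSome_get?, h, PySem.Dict.getD_of_get?_eq_some _ "" h]
      simp
  · rw [Bool.or_eq_true, not_or] at hwin
    have hgt : compare_specificity nspec cspec = false := by simpa using hwin.1
    have heq : (nspec == cspec) = false := by simpa using hwin.2
    rw [foldl_lose _ _ _ hgt heq, ← dict_update_eq_foldl]
    have hLf : (((PySem.Dict.ofList nstyles : PySem.Dict String String).items.filter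
        (fun pv => !(PySem.Dict.ofList cstyles : PySem.Dict String String).contains pv.1)).map
          Prod.fst).Nodup :=
      hndk.sublist (List.Sublist.map Prod.fst List.filter_sublist)
    rw [update_items_as_map _ _ hcurnd hLf]
    have hkeys : (((PySem.Dict.ofList nstyles : PySem.Dict String String).items.filter
          (fun pv => !(PySem.Dict.ofList cstyles : PySem.Dict String String).contains pv.1)).map
            Prod.fst).filter
          (fun k => !(PySem.Dict.ofList cstyles : PySem.Dict String String).contains k)
        = (PySem.Dict.ofList nstyles : PySem.Dict String String).keys.filter
            (fun p => !(PySem.Dict.ofList cstyles : PySem.Dict String String).contains p) := by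
      have hmap : ((PySem.Dict.ofList nstyles : PySem.Dict String String).items.filter
            (fun pv => !(PySem.Dict.ofList cstyles : PySem.Dict String String).contains pv.1)).map
              Prod.fst
          = ((PySem.Dict.ofList nstyles : PySem.Dict String String).items.map Prod.fst).filter
              (fun k => !(PySem.Dict.ofList cstyles : PySem.Dict String String).contains k) := by
        rw [List.filter_map]
        rfl
      rw [hmap, List.filter_filter]
      simp only [Bool.and_self]
      rfl
    rw [hkeys]
    apply List.map_congr_left
    intro k _
    rw [hgt, heq, get?_mk_filter_contains]
    cases hq : (PySem.Dict.ofList cstyles : PySem.Dict String String).contains k with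
    | true =>
      simp
    | false =>
      cases h : (PySem.Dict.ofList nstyles : PySem.Dict String String).get? k with
      | none =>
        rw [PySem.Dict.contains_eq_isSome_get?, h]
        simp
      | some v =>
        rw [PySem.Dict.contains_eq_isSome_get?, h, PySem.Dict.getD_of_get?_eq_some _ "" h]
        simp
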